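-- pv_equiv track=rewrite | github.com/makr-code/VCC-PKI | src/code_manifest.py | _extract_source_without_manifest
-- ===== SOURCE A (Python) =====
-- MANIFEST_MARKER = "# VCC-MANIFEST:"
--
-- def _extract_source_without_manifest(source_code: str) -> str:
--     """Extract source code without manifest header."""
--     lines = source_code.split('\n')
--     result = []
--     skip_manifest = False
--
--     for line in lines:
--         if line.startswith(MANIFEST_MARKER):
--             skip_manifest = True
--             continue
--         elif skip_manifest and line.startswith('#'):
--             continue
--         else:
--             skip_manifest = False
--             result.append(line)
--
--     return '\n'.join(result).lstrip('\n')
-- ===== SOURCE B (Python) =====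
-- MANIFEST_MARKER = "# VCC-MANIFEST:"
--
-- def _extract_source_without_manifest(source_code: str) -> str:
--     """Extract source code without manifest header."""
--     lines = source_code.split('\n')
--
--     def dropped(i):
--         # a line is dropped iff, scanning backwards through the contiguous
--         # run of '#'-prefixed lines it sits in, a manifest marker is found
--         j = i
--         while j >= 0 and lines[j].startswith('#'):
--             if lines[j].startswith(MANIFEST_MARKER):
--                 return True
--             j -= 1
--         return False
--
--     result = [line for i, line in enumerate(lines) if not dropped(i)]
--     return '\n'.join(result).lstrip('\n')
-- ===== Notes on version B (the rewrite author's own statement) =====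
-- stated objective: alternative
-- what changed: Replaced A's forward state-machine (skip_manifest flag) by a stateless declarative filter: each line is independently classified by a local backward scan through its contiguous comment run looking for a manifest marker, and the kept lines are collected in a comprehension.
import Mathlib
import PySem

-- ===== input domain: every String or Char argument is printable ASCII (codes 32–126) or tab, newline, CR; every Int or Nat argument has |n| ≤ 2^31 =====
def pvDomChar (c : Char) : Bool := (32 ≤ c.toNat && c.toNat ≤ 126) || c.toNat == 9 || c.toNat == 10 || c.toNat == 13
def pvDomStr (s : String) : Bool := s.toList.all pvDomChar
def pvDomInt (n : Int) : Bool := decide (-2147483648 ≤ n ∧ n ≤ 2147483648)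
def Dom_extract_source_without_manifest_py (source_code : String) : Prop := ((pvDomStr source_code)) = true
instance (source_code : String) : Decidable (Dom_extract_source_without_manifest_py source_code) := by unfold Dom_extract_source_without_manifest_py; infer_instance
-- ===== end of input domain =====

-- B replaces A's forward skip_manifest state machine by a stateless per-line predicate:
-- a line is dropped iff a backward scan through its contiguous '#'-comment run hits a
-- manifest marker (objective: alternative, same output).

def manifestMarker : List Char := "# VCC-MANIFEST:".toList

-- ===== PORT A =====
-- the for-loop over lines with (result, skip_manifest) state
def aLoop : List (List Char) → List (List Char) → Bool → List (List Char)
  | [], acc, _ => acc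
  | l :: ls, acc, skip =>
    if PySem.Chars.startswith l manifestMarker then aLoop ls acc true
    else if skip && PySem.Chars.startswith l ['#'] then aLoop ls acc skip
    else aLoop ls (acc ++ [l]) false

def extract_source_without_manifest_py (source_code : String) : String :=
  let lines := PySem.Chars.splitOn source_code.toList ['\n']
  let result := aLoop lines [] false
  -- '\n'.join(result).lstrip('\n'); lstrip with the explicit char set '\n' is dropWhile (= '\n') — exact
  String.ofList ((PySem.Chars.join ['\n'] result).dropWhile (fun c => c == '\n'))

-- ===== PORT B =====
-- dropped(i): the backward while-loop 'j = i; while j >= 0 and lines[j].startswith("#"): …; j -= 1',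
-- transcribed as recursion over lines[i], lines[i-1], … given as the reversed prefix ending at i
def bDropped : List (List Char) → Bool
  | [] => false
  | l :: rest =>
    if PySem.Chars.startswith l ['#'] then
      if PySem.Chars.startswith l manifestMarker then true else bDropped rest
    else false

-- the comprehension '[line for i, line in enumerate(lines) if not dropped(i)]':
-- walk the lines keeping the reversed prefix of already-seen lines for bDropped
def bFilter : List (List Char) → List (List Char) → List (List Char)
  | _, [] => []
  | rev, l :: ls =>
    (if bDropped (l :: rev) then [] else [l]) ++ bFilter (l :: rev) ls

def extract_source_without_manifest_py_alt (source_code : String) : String :=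
  let lines := PySem.Chars.splitOn source_code.toList ['\n']
  let result := bFilter [] lines
  String.ofList ((PySem.Chars.join ['\n'] result).dropWhile (fun c => c == '\n'))

-- ===== PRECONDITION & SPEC =====
def Spec_extract_source_without_manifest_py (source_code : String) (out : String) : Prop := out = extract_source_without_manifest_py_alt source_code
instance (source_code : String) (out : String) : Decidable (Spec_extract_source_without_manifest_py source_code out) := by unfold Spec_extract_source_without_manifest_py; infer_instance

-- ===== CLAIM (what is proved, stated in full; the proofs are below) =====
def Claim_equal_extract_source_without_manifest_py : Prop := ∀ (source_code : String), Dom_extract_source_without_manifest_py source_code → Spec_extract_source_without_manifest_py source_code (extract_source_without_manifest_py source_code)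

-- ===== LEMMAS AND PROOFS =====

-- a line starting with the manifest marker starts with '#'
theorem startswith_hash_of_marker {l : List Char}
    (h : PySem.Chars.startswith l manifestMarker = true) :
    PySem.Chars.startswith l ['#'] = true := by
  rw [PySem.Chars.startswith_iff] at h ⊢
  exact List.IsPrefix.trans (by decide) h

-- invariant: A's skip flag after processing the (reversed) prefix rev equals bDropped rev,
-- hence A's flag loop produces exactly B's filtered list
theorem aLoop_eq_bFilter (ls : List (List Char)) :
    ∀ rev acc, aLoop ls acc (bDropped rev) = acc ++ bFilter rev ls := by
  induction ls with
  | nil => simp [aLoop, bFilter]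
  | cons l ls ih =>
    intro rev acc
    by_cases hm : PySem.Chars.startswith l manifestMarker = true
    · have hh := startswith_hash_of_marker hm
      have hd : bDropped (l :: rev) = true := by simp [bDropped, hh, hm]
      simp only [aLoop, bFilter, hm, if_pos, hd]
      simpa [hd] using ih (l :: rev) acc
    · by_cases hh : PySem.Chars.startswith l ['#'] = true
      · by_cases hr : bDropped rev = true
        · have hd : bDropped (l :: rev) = true := by simp [bDropped, hh, hm, hr]
          simp only [aLoop, bFilter, hm, hr, hh, hd, Bool.true_and]
          simpa [hd] using ih (l :: rev) acc
        · have hr' : bDropped rev = false := by simpa using hr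
          have hd : bDropped (l :: rev) = false := by simp [bDropped, hh, hm, hr']
          simp only [aLoop, bFilter, hm, hr', hh, hd, Bool.false_and]
          simp only [Bool.false_eq_true,
            if_false]
          have := ih (l :: rev) (acc ++ [l])
          rw [hd] at this
          simpa [List.append_assoc] using this
      · have hh' : PySem.Chars.startswith l ['#'] = false := by simpa using hh
        have hd : bDropped (l :: rev) = false := by simp [bDropped, hh']
        simp only [aLoop, bFilter, hm, hh', hd, Bool.and_false,
          Bool.false_eq_true, if_false]
        have := ih (l :: rev) (acc ++ [l])
        rw [hd] at this
        simpa [List.append_assoc] using this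

-- ===== VERDICT (by name: the statement is the Claim_ definition above) =====
theorem extract_source_without_manifest_py_spec : Claim_equal_extract_source_without_manifest_py := by
  intro s _
  unfold Spec_extract_source_without_manifest_py
  unfold extract_source_without_manifest_py extract_source_without_manifest_py_alt
  have := aLoop_eq_bFilter (PySem.Chars.splitOn s.toList ['\n']) [] []
  simp only [bDropped] at this
  simp [this]
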